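-- pv_equiv track=rewrite | github.com/daniel-reich/turbo-robot | 82AvsFFQprj43XCDS_16.py | no_strangers
-- ===== SOURCE A (Python) =====
-- def no_strangers(txt):
--   txt = ''.join([i.lower() for i in txt if i not in '.,"']).split()
--   d = {}
--   aquaintances = []
--   friends = []
--   for i in txt:
--     if i not in d:
--       d[i] = 1
--     else:
--       d[i] += 1
--     if d[i] == 3 and d[i] not in aquaintances and d[i] not in friends:
--       aquaintances.append(i)
--     if d[i] == 5 and d[i] not in friends:
--       friends.append(i)
--       aquaintances.remove(i)
--   return [aquaintances, friends]
-- ===== SOURCE B (Python) =====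
-- def no_strangers(txt):
--     words = ''.join(c.lower() for c in txt if c not in '.,"').split()
--     total = {}
--     for w in words:
--         total[w] = total.get(w, 0) + 1
--     acquaintances = []
--     friends = []
--     seen = {}
--     for w in words:
--         seen[w] = seen.get(w, 0) + 1
--         if seen[w] == 3 and total[w] < 5:
--             acquaintances.append(w)
--         elif seen[w] == 5:
--             friends.append(w)
--     return [acquaintances, friends]
-- ===== Notes on version B (the rewrite author's own statement) =====
-- stated objective: alternative
-- what changed: Replaces A's single interleaved pass (append at count 3, then remove again at count 5, with dead int-in-list checks) by a count-table-then-emit decomposition: one pass builds total word counts, a second pass appends a word to acquaintances at its 3rd occurrence only when its total count is below 5 and to friends at its 5th occurrence, so no list element is ever removed.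
import Mathlib
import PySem

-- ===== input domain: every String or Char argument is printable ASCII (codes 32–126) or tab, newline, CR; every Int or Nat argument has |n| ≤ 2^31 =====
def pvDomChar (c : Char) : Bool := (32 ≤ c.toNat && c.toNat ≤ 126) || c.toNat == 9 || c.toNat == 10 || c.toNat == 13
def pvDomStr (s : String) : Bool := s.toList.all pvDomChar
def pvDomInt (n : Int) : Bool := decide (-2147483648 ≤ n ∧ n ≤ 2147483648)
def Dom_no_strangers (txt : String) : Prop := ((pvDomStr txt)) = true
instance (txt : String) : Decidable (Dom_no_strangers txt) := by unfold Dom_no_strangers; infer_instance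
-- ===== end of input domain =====

-- B replaces A's interleaved append-then-remove pass by a total-count table plus a second emitting pass
-- (alternative decomposition, same observable result).

-- ===== PORT A =====
-- Shared tokenization: both Pythons contain the identical line
--   ''.join([i.lower() for i in txt if i not in '.,"']).split()
-- `i not in '.,"'` on a 1-char string is membership among the chars; `i.lower()` on one char is lowerChar.
def pvTokens (txt : String) : List String :=
  PySem.Str.split₀
    (String.ofList ((txt.toList.filter
      (fun c => PySem.Chars.isIn [c] ['.', ',', '"'] = false)).map PySem.Chars.lowerChar))

-- Python's `n in xs` with n an int and xs a list of str: int == str is always False elementwise.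
def pyIntInStrList (_n : Int) (xs : List String) : Bool := xs.any (fun _ => false)

-- one iteration of A's for-loop; state = (d, aquaintances, friends)
def stepA (st : PySem.Dict String Int × List String × List String) (i : String) :
    PySem.Dict String Int × List String × List String :=
  -- if i not in d: d[i] = 1 else: d[i] += 1   (the else-branch key is present, d[i]+=1 is modify)
  let d := if st.1.contains i = false then st.1.insert i 1 else st.1.modify i 0 (· + 1)
  -- d[i] is always present after the update: getD is exact
  let a := if d.getD i 0 = 3 ∧ pyIntInStrList (d.getD i 0) st.2.1 = false
              ∧ pyIntInStrList (d.getD i 0) st.2.2 = false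
           then st.2.1 ++ [i] else st.2.1
  if d.getD i 0 = 5 ∧ pyIntInStrList (d.getD i 0) st.2.2 = false then
    -- aquaintances.remove(i): i was appended at count 3 and never removed before, so
    -- remove? always succeeds here (proved below); getD is exact, never the default.
    (d, (PySem.List.remove? a i).getD a, st.2.2 ++ [i])
  else (d, a, st.2.2)

def no_strangers (txt : String) : List (List String) :=
  let txt' := pvTokens txt
  let st := txt'.foldl stepA (PySem.Dict.empty, ([], []))
  [st.2.1, st.2.2]

-- ===== PORT B =====
-- one iteration of B's second (emitting) loop; state = (seen, acquaintances, friends)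
def stepB (total : PySem.Dict String Int)
    (st : PySem.Dict String Int × List String × List String) (w : String) :
    PySem.Dict String Int × List String × List String :=
  let seen := st.1.insert w (st.1.getD w 0 + 1)
  -- total[w]: w is always a key of total (it occurs in words), so getD is exact
  if seen.getD w 0 = 3 ∧ total.getD w 0 < 5 then (seen, st.2.1 ++ [w], st.2.2)
  else if seen.getD w 0 = 5 then (seen, st.2.1, st.2.2 ++ [w])
  else (seen, st.2.1, st.2.2)

def no_strangers_alt (txt : String) : List (List String) :=
  let words := pvTokens txt
  let total := words.foldl (fun t w => t.insert w (t.getD w 0 + 1)) PySem.Dict.empty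
  let st := words.foldl (stepB total) (PySem.Dict.empty, ([], []))
  [st.2.1, st.2.2]

-- ===== PRECONDITION & SPEC =====
def Spec_no_strangers (txt : String) (out : List (List String)) : Prop := out = no_strangers_alt txt
instance (txt : String) (out : List (List String)) : Decidable (Spec_no_strangers txt out) := by unfold Spec_no_strangers; infer_instance

-- ===== CLAIM (what is proved, stated in full; the proofs are below) =====
def Claim_equal_no_strangers : Prop := ∀ (txt : String), Dom_no_strangers txt → Spec_no_strangers txt (no_strangers txt)

-- ===== LEMMAS AND PROOFS =====

-- invariant of A's loop state after processing the prefix p of the word list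
def InvA (p : List String) (st : PySem.Dict String Int × List String × List String) : Prop :=
  (∀ x, st.1.getD x 0 = (p.count x : Int)) ∧
  (∀ x, st.1.contains x = true ↔ x ∈ p) ∧
  st.2.1.Nodup ∧
  (∀ x, x ∈ st.2.1 ↔ (3 ≤ p.count x ∧ p.count x ≤ 4))

lemma pyIntInStrList_false (n : Int) (xs : List String) : pyIntInStrList n xs = false := by
  simp [pyIntInStrList]

lemma filter_erase_of_pred_false {α : Type} [DecidableEq α] (q : α → Bool) (a : List α)
    (i : α) (h : q i = false) : (a.erase i).filter q = a.filter q := by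
  induction a with
  | nil => simp
  | cons x t ih =>
    by_cases hx : x = i
    · subst hx; simp [List.erase_cons_head, h]
    · rw [List.erase_cons_tail (by simpa using hx)]
      simp [List.filter_cons, ih]

lemma stepA_char (p : List String) (d : PySem.Dict String Int) (a f : List String) (i : String)
    (h : InvA p (d, a, f)) :
    stepA (d, a, f) i =
      ((if d.contains i = false then d.insert i 1 else d.modify i 0 (· + 1)),
       (if p.count i + 1 = 3 then a ++ [i]
        else if p.count i + 1 = 5 then a.erase i else a),
       (if p.count i + 1 = 5 then f ++ [i] else f))
    ∧ InvA (p ++ [i]) (stepA (d, a, f) i) := by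
  obtain ⟨hd, hc, hnd, hmem⟩ := h
  simp only [InvA] at *
  set d' : PySem.Dict String Int :=
    (if d.contains i = false then d.insert i 1 else d.modify i 0 (· + 1)) with hd'def
  have hcnt_ne : ∀ x, x ≠ i → (p ++ [i]).count x = p.count x := by
    intro x hx
    simp [List.count_append, Ne.symm hx]
  -- the updated dict value at i is count p i + 1, elsewhere unchanged
  have hd' : ∀ x, d'.getD x 0 = ((p ++ [i]).count x : Int) := by
    intro x
    rcases eq_or_ne x i with hx | hx
    · subst hx
      by_cases hci : d.contains x = false
      · have hip : x ∉ p := by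
          intro hmem'; have := (hc x).mpr hmem'; rw [hci] at this; exact absurd this (by simp)
        rw [hd'def, if_pos hci, PySem.Dict.getD_insert_self]
        simp [List.count_append, List.count_eq_zero.mpr hip]
      · rw [hd'def, if_neg hci, PySem.Dict.getD_modify_self, hd x]
        simp [List.count_append]
    · rw [hcnt_ne x hx]
      by_cases hci : d.contains i = false
      · rw [hd'def, if_pos hci, PySem.Dict.getD_insert_of_ne _ _ _ hx, hd x]
      · rw [hd'def, if_neg hci, PySem.Dict.getD_modify_of_ne _ _ _ hx, hd x]
  have hdi : d'.getD i 0 = (p.count i : Int) + 1 := by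
    have := hd' i; simp [List.count_append] at this; omega
  have hc' : ∀ x, d'.contains x = true ↔ x ∈ p ++ [i] := by
    intro x
    by_cases hci : d.contains i = false
    · rw [hd'def, if_pos hci, PySem.Dict.contains_insert]
      rcases eq_or_ne x i with hx | hx
      · subst hx; simp
      · simp [hx, hc x]
    · rw [hd'def, if_neg hci, PySem.Dict.contains_modify]
      rcases eq_or_ne x i with hx | hx
      · subst hx; simp
      · simp [hx, hc x]
  -- unfold stepA with the always-false int-in-list tests removed
  have hstep : stepA (d, a, f) i =
      (d', (if d'.getD i 0 = 3 then a ++ [i]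
            else if d'.getD i 0 = 5 then (PySem.List.remove?
              (if d'.getD i 0 = 3 then a ++ [i] else a) i).getD
              (if d'.getD i 0 = 3 then a ++ [i] else a) else a),
       (if d'.getD i 0 = 5 then f ++ [i] else f)) := by
    simp only [stepA, pyIntInStrList_false, hd'def]
    by_cases h3 : ((if d.contains i = false then d.insert i 1 else d.modify i 0 (· + 1)) :
        PySem.Dict String Int).getD i 0 = 3 <;>
    by_cases h5 : ((if d.contains i = false then d.insert i 1 else d.modify i 0 (· + 1)) :
        PySem.Dict String Int).getD i 0 = 5 <;>
    simp [h3, h5]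
  have hcount_i : ∀ x, (p ++ [i]).count x = p.count x + (if x = i then 1 else 0) := by
    intro x
    rcases eq_or_ne x i with hx | hx
    · subst hx; simp [List.count_append]
    · simp [hcnt_ne x hx, hx]
  -- case analysis on the new count c = p.count i + 1
  by_cases h3 : p.count i + 1 = 3
  · -- third occurrence: append to acquaintances
    have h3' : d'.getD i 0 = 3 := by rw [hdi]; omega
    have h5' : ¬ d'.getD i 0 = 5 := by rw [hdi]; omega
    have hia : i ∉ a := by
      intro hin; have := (hmem i).mp hin; omega
    have hA : stepA (d, a, f) i = (d', a ++ [i], f) := by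
      rw [hstep]; simp [h3']
    constructor
    · rw [hA]; simp [h3]
    · rw [hA]
      refine ⟨hd', hc', ?_, ?_⟩
      · exact List.Nodup.append hnd (by simp) (by simpa using hia)
      · intro x; rw [hcount_i]
        rcases eq_or_ne x i with hx | hx
        · subst hx; simp [hia]; omega
        · simp [hx, hmem x]
  · by_cases h5 : p.count i + 1 = 5
    · -- fifth occurrence: move to friends
      have h3' : ¬ d'.getD i 0 = 3 := by rw [hdi]; omega
      have h5' : d'.getD i 0 = 5 := by rw [hdi]; omega
      have hia : i ∈ a := (hmem i).mpr (by omega)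
      have hrem : PySem.List.remove? a i = some (a.erase i) :=
        PySem.List.remove?_eq_some_erase a i hia
      have hA : stepA (d, a, f) i = (d', a.erase i, f ++ [i]) := by
        rw [hstep]; simp [h5', hrem]
      constructor
      · rw [hA]; simp [h5]
      · rw [hA]
        refine ⟨hd', hc', hnd.erase i, ?_⟩
        intro x; rw [hcount_i, List.Nodup.mem_erase_iff hnd]
        rcases eq_or_ne x i with hx | hx
        · subst hx; simp; omega
        · simp [hx, hmem x]
    · -- other occurrences: lists unchanged
      have h3' : ¬ d'.getD i 0 = 3 := by rw [hdi]; omega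
      have h5' : ¬ d'.getD i 0 = 5 := by rw [hdi]; omega
      have hA : stepA (d, a, f) i = (d', a, f) := by
        rw [hstep]; simp [h3', h5']
      constructor
      · rw [hA]; simp [h3, h5]
      · rw [hA]
        refine ⟨hd', hc', hnd, ?_⟩
        intro x; rw [hcount_i]
        rcases eq_or_ne x i with hx | hx
        · subst hx; simp [hmem x]; omega
        · simp [hx, hmem x]

-- parallel induction: B's loop (on a total-count table) tracks A's loop through a filter
lemma mainLoop (total : PySem.Dict String Int) :
    ∀ (s p : List String) (dA : PySem.Dict String Int) (a f : List String)
      (dB : PySem.Dict String Int),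
    InvA p (dA, a, f) →
    (∀ x, dB.getD x 0 = (p.count x : Int)) →
    (∀ x, total.getD x 0 = ((p ++ s).count x : Int)) →
    (s.foldl (stepB total) (dB, a.filter (fun x => decide (total.getD x 0 < 5)), f)).2
      = ((s.foldl stepA (dA, a, f)).2.1.filter (fun x => decide (total.getD x 0 < 5)),
         (s.foldl stepA (dA, a, f)).2.2)
    ∧ InvA (p ++ s) (s.foldl stepA (dA, a, f)) := by
  intro s
  induction s with
  | nil => intro p dA a f dB hI hB hT; simpa using hI
  | cons i s ih =>
    intro p dA a f dB hI hB hT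
    obtain ⟨hstep, hI'⟩ := stepA_char p dA a f i hI
    have hdBi : (dB.insert i (dB.getD i 0 + 1)).getD i 0 = (p.count i : Int) + 1 := by
      rw [PySem.Dict.getD_insert_self, hB]
    have hB' : ∀ x, (dB.insert i (dB.getD i 0 + 1)).getD x 0 = ((p ++ [i]).count x : Int) := by
      intro x
      rcases eq_or_ne x i with hx | hx
      · subst hx; rw [PySem.Dict.getD_insert_self, hB x]
        simp [List.count_append]
      · rw [PySem.Dict.getD_insert_of_ne _ _ _ hx, hB x]
        simp [List.count_append, Ne.symm hx]
    obtain ⟨hdA, hcA, hnd, hmem⟩ := hI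
    have key : stepB total (dB, a.filter (fun x => decide (total.getD x 0 < 5)), f) i
        = (dB.insert i (dB.getD i 0 + 1),
           (stepA (dA, a, f) i).2.1.filter (fun x => decide (total.getD x 0 < 5)),
           (stepA (dA, a, f) i).2.2) := by
      rw [hstep]
      simp only [stepB, hdBi]
      by_cases h3 : p.count i + 1 = 3
      · have h3' : (p.count i : Int) + 1 = 3 := by omega
        have h5' : ¬ (p.count i : Int) + 1 = 5 := by omega
        have hTi3 : (3 : Int) ≤ total.getD i 0 := by
          rw [hT i]; simp [List.count_append]; omega
        by_cases hq5 : total.getD i 0 < 5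
        · simp [h3, h3', hq5, List.filter_append]
        · simp [h3, h3', hq5, List.filter_append]
      · by_cases h5 : p.count i + 1 = 5
        · have h3' : ¬ (p.count i : Int) + 1 = 3 := by omega
          have h5' : (p.count i : Int) + 1 = 5 := by omega
          have hTi : ¬ total.getD i 0 < 5 := by
            rw [hT i]; simp [List.count_append]; omega
          have hqI : (decide (total.getD i 0 < 5)) = false := by simpa using hTi
          simp [h5, h5', hTi, filter_erase_of_pred_false
            (fun x => decide (total.getD x 0 < 5)) a i hqI]
        · have h3' : ¬ (p.count i : Int) + 1 = 3 := by omega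
          have h5' : ¬ (p.count i : Int) + 1 = 5 := by omega
          simp [h3, h5, h3', h5']
    simp only [List.foldl_cons, key]
    have := ih (p ++ [i]) (stepA (dA, a, f) i).1
      (stepA (dA, a, f) i).2.1 (stepA (dA, a, f) i).2.2
      (dB.insert i (dB.getD i 0 + 1))
      (by simpa using hI') hB' (by intro x; rw [hT x]; simp [List.count_append])
    simpa using this

lemma noStrangers_agree (ws : List String) :
    (ws.foldl (stepB (ws.foldl (fun t w => t.insert w (t.getD w 0 + 1)) PySem.Dict.empty))
        ((PySem.Dict.empty : PySem.Dict String Int), ([] : List String), ([] : List String))).2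
      = ((ws.foldl stepA (PySem.Dict.empty, ([], []))).2.1,
         (ws.foldl stepA (PySem.Dict.empty, ([], []))).2.2) := by
  set total : PySem.Dict String Int :=
    ws.foldl (fun t w => t.insert w (t.getD w 0 + 1)) PySem.Dict.empty with htotal
  have hT : ∀ x, total.getD x 0 = (ws.count x : Int) := by
    intro x; rw [htotal, PySem.Dict.getD_foldl_insert_add_one]; simp
  have hI0 : InvA [] ((PySem.Dict.empty : PySem.Dict String Int),
      ([] : List String), ([] : List String)) := by
    refine ⟨by simp [PySem.Dict.getD_empty], by simp [PySem.Dict.contains_empty], by simp, by simp⟩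
  have := mainLoop total ws [] PySem.Dict.empty [] [] PySem.Dict.empty hI0
    (by simp [PySem.Dict.getD_empty]) (by intro x; rw [hT x]; simp)
  obtain ⟨heq, hIend⟩ := this
  simp only [List.nil_append] at heq hIend
  have hfilter : (ws.foldl stepA (PySem.Dict.empty, ([], []))).2.1.filter
      (fun x => decide (total.getD x 0 < 5))
      = (ws.foldl stepA (PySem.Dict.empty, ([], []))).2.1 := by
    apply List.filter_eq_self.mpr
    intro x hx
    have := (hIend.2.2.2 x).mp hx
    rw [hT x]; simp; omega
  rw [List.filter_nil] at heq
  rw [heq, hfilter]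

-- ===== VERDICT (by name: the statement is the Claim_ definition above) =====
theorem no_strangers_spec : Claim_equal_no_strangers := by
  intro txt _
  unfold Spec_no_strangers no_strangers no_strangers_alt
  have h := noStrangers_agree (pvTokens txt)
  rw [Prod.ext_iff] at h
  simp only [h.1, h.2]
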